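-- pv_equiv track=rewrite | github.com/sammyghe/Godena | app.py | location_score
-- ===== SOURCE A (Python) =====
-- def location_score(agent, location_words):
--     loc     = (agent.get("location")     or "").lower()
--     country = (agent.get("country")      or "").lower()
--     name    = (agent.get("name")         or "").lower()
--     hood    = (agent.get("neighborhood") or "").lower()
--     s = 0
--     for w in location_words:
--         if w in loc:     s += 25
--         if w in country: s += 15
--         if w in hood:    s += 20
--         if w in name:    s += 10
--     return s
-- ===== SOURCE B (Python) =====
-- def location_score(agent, location_words):
--     # Tally each distinct word once (a counter), then add multiplicity * per-word weight.
--     counts = {}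
--     for w in location_words:
--         counts[w] = counts.get(w, 0) + 1
--     fields = [(agent.get("location") or "").lower(),
--               (agent.get("country") or "").lower(),
--               (agent.get("neighborhood") or "").lower(),
--               (agent.get("name") or "").lower()]
--     weights = [25, 15, 20, 10]
--     total = 0
--     for w, c in counts.items():
--         total += c * sum(wt for f, wt in zip(fields, weights) if w in f)
--     return total
-- ===== Notes on version B (the rewrite author's own statement) =====
-- stated objective: alternative
-- what changed: Builds a counter of the words first so each distinct word's substring weight is computed once, then sums multiplicity times a per-word weight obtained from a zipped (field, weight) table, instead of A's per-occurrence accumulator loop with four hard-coded branches.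
import Mathlib
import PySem

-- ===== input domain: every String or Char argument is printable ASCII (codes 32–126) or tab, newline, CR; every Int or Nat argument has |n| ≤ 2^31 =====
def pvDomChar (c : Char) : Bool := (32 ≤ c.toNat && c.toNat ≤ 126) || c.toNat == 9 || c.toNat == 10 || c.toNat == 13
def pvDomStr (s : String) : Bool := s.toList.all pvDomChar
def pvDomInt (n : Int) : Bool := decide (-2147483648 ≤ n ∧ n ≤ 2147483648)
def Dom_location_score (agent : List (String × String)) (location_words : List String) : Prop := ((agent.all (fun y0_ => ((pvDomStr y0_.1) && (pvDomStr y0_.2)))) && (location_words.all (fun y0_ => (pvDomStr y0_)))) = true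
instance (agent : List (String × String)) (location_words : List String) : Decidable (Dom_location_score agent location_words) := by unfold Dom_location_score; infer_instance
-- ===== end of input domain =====

-- B tallies the words into a counter and sums multiplicity × per-word weight from a zipped (field, weight) table; objective: alternative.


-- ===== PORT A =====
-- (agent.get(k) or "") = getD agent k "" : the only falsy str is "", so 'or ""' is the default
def location_score (agent : List (String × String)) (location_words : List String) : Int :=
  let loc     := PySem.Str.lower (PySem.Dict.getD (PySem.Dict.mk agent) "location" "")
  let country := PySem.Str.lower (PySem.Dict.getD (PySem.Dict.mk agent) "country" "")
  let name    := PySem.Str.lower (PySem.Dict.getD (PySem.Dict.mk agent) "name" "")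
  let hood    := PySem.Str.lower (PySem.Dict.getD (PySem.Dict.mk agent) "neighborhood" "")
  location_words.foldl (fun s w =>
    let s := if PySem.Str.isIn w loc     then s + 25 else s
    let s := if PySem.Str.isIn w country then s + 15 else s
    let s := if PySem.Str.isIn w hood    then s + 20 else s
    let s := if PySem.Str.isIn w name    then s + 10 else s
    s) 0

-- ===== PORT B =====
def location_score_alt (agent : List (String × String)) (location_words : List String) : Int :=
  let counts := location_words.foldl (fun d w => d.insert w (d.getD w 0 + 1))
                  (PySem.Dict.empty : PySem.Dict String Int)
  let fields := [ PySem.Str.lower (PySem.Dict.getD (PySem.Dict.mk agent) "location" "")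
                , PySem.Str.lower (PySem.Dict.getD (PySem.Dict.mk agent) "country" "")
                , PySem.Str.lower (PySem.Dict.getD (PySem.Dict.mk agent) "neighborhood" "")
                , PySem.Str.lower (PySem.Dict.getD (PySem.Dict.mk agent) "name" "") ]
  let weights : List Int := [25, 15, 20, 10]
  counts.items.foldl (fun total p =>
    total + p.2 * (((fields.zip weights).filter (fun fw => PySem.Str.isIn p.1 fw.1)).map
                     (fun fw => fw.2)).sum) 0

-- ===== PRECONDITION & SPEC =====
def Spec_location_score (agent : List (String × String)) (location_words : List String) (out : Int) : Prop := out = location_score_alt agent location_words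
instance (agent : List (String × String)) (location_words : List String) (out : Int) : Decidable (Spec_location_score agent location_words out) := by unfold Spec_location_score; infer_instance

-- ===== CLAIM (what is proved, stated in full; the proofs are below) =====
def Claim_equal_location_score : Prop := ∀ (agent : List (String × String)) (location_words : List String), Dom_location_score agent location_words → Spec_location_score agent location_words (location_score agent location_words)

-- ===== LEMMAS AND PROOFS =====
-- the per-word weight A's loop adds for one word
def pvWeight (loc country hood name w : String) : Int :=
  (if PySem.Str.isIn w loc then 25 else 0) + (if PySem.Str.isIn w country then 15 else 0)
  + (if PySem.Str.isIn w hood then 20 else 0) + (if PySem.Str.isIn w name then 10 else 0)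

lemma foldl_add_map {α : Type} (g : α → Int) (l : List α) (s : Int) :
    l.foldl (fun t p => t + g p) s = s + (l.map g).sum := by
  induction l generalizing s with
  | nil => simp
  | cons a t ih => simp [ih]; ring

lemma a_fold_eq (loc country hood name : String) (lw : List String) (s : Int) :
    lw.foldl (fun s w =>
      let s := if PySem.Str.isIn w loc     then s + 25 else s
      let s := if PySem.Str.isIn w country then s + 15 else s
      let s := if PySem.Str.isIn w hood    then s + 20 else s
      let s := if PySem.Str.isIn w name    then s + 10 else s
      s) s
    = s + (lw.map (pvWeight loc country hood name)).sum := by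
  induction lw generalizing s with
  | nil => simp
  | cons w t ih => simp only [List.foldl_cons, List.map_cons, List.sum_cons, ih, pvWeight]
                   split_ifs <;> ring

lemma sum_ite_nodup (d : List String) (hd : d.Nodup) (w : String) (hw : w ∈ d) (c : Int) :
    (d.map (fun k => if k = w then c else 0)).sum = c := by
  induction d with
  | nil => cases hw
  | cons a t ih =>
    obtain ⟨ha, ht⟩ := List.nodup_cons.mp hd
    by_cases h : a = w
    · subst h
      have hz : (t.map (fun k => if k = a then c else 0)).sum = 0 := by
        apply List.sum_eq_zero; intro x hx
        simp only [List.mem_map] at hx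
        obtain ⟨k, hk, rfl⟩ := hx
        have hne : k ≠ a := fun e => ha (e ▸ hk)
        simp [hne]
      simp [hz]
    · have hw' : w ∈ t := by
        rcases List.mem_cons.mp hw with e | e
        · exact absurd e.symm h
        · exact e
      simp [h, ih ht hw']

lemma sum_count_mul (f : String → Int) (l d : List String) (hd : d.Nodup)
    (hmem : ∀ x ∈ l, x ∈ d) :
    (d.map (fun k => (l.count k : Int) * f k)).sum = (l.map f).sum := by
  induction l with
  | nil => simp
  | cons w t ih =>
    have hw : w ∈ d := hmem w (by simp)
    have ht : ∀ x ∈ t, x ∈ d := fun x hx => hmem x (by simp [hx])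
    have hsplit : (d.map (fun k => ((w :: t).count k : Int) * f k)).sum
        = (d.map (fun k => (t.count k : Int) * f k)).sum
          + (d.map (fun k => if k = w then f k else 0)).sum := by
      rw [← List.sum_map_add]
      apply congrArg List.sum
      apply List.map_congr_left
      intro k _
      by_cases h : k = w
      · simp [h]; ring
      · have hne : ¬ w = k := fun e => h e.symm
        simp [h, hne]
    have hite : (d.map (fun k => if k = w then f k else 0)).sum = f w := by
      have := sum_ite_nodup d hd w hw (f w)
      rw [← this]
      apply congrArg List.sum
      apply List.map_congr_left
      intro k _
      by_cases h : k = w <;> simp [h]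
    simp [hsplit, hite, ih ht]
    ring

-- ===== VERDICT (by name: the statement is the Claim_ definition above) =====
theorem location_score_spec : Claim_equal_location_score := by
  intro agent lw _
  unfold Spec_location_score location_score location_score_alt
  dsimp only
  rw [PySem.Dict.foldl_insert_getD_add_one_eq_counter, a_fold_eq]
  rw [PySem.Dict.items_counter, foldl_add_map, List.map_map]
  simp only [zero_add, Function.comp_def]
  rw [← sum_count_mul (pvWeight _ _ _ _) lw (PySem.Set.ofList lw) (PySem.Set.nodup_ofList _)
        (fun x hx => (PySem.Set.mem_ofList lw x).mpr hx)]
  apply congrArg List.sum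
  apply List.map_congr_left
  intro k _
  congr 1
  simp only [pvWeight, List.zip_cons_cons, List.zip_nil_right,
    List.filter_cons, List.filter_nil]
  split_ifs <;> simp
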